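-- pv_equiv track=rewrite | github.com/wyk18703232953/myResearch | codeComplex/data/filteredData/python/nlogn/python_nlogn_0205.py | solve
-- ===== SOURCE A (Python) =====
-- def check(k, b, T):
--     c = [e for e in b if e[0] >= k]
--
--     if len(c) < k:
--         return False, None
--
--     first_k_probs = c[:k]
--     s = sum(e[1] for e in first_k_probs)
--
--     if s > T:
--         return False, None
--
--     return True, first_k_probs
--
-- def solve(n, T, a, t):
--     b = [(a[i], t[i], i + 1) for i in range(n)]
--     b.sort(key=lambda x: x[1])
--
--     low, high = 0, n
--     result = 0
--     final_probs = []
--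
--     while low <= high:
--         mid = (low + high) // 2
--
--         possible, probs = check(mid, b, T)
--         if possible:
--             result, final_probs = mid, probs
--             low = mid + 1
--         else:
--             high = mid - 1
--
--     return result, [e[2] for e in final_probs]
-- ===== SOURCE B (Python) =====
-- def solve(n, T, a, t):
--     order = sorted(range(n), key=lambda i: t[i])
--     for k in range(n, 0, -1):
--         chosen = [i for i in order if a[i] >= k][:k]
--         if len(chosen) == k and sum(t[i] for i in chosen) <= T:
--             return k, [i + 1 for i in chosen]
--     return 0, []
-- ===== Notes on version B (the rewrite author's own statement) =====
-- stated objective: simpler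
-- what changed: Replaces the binary search over k (with the separate check() helper building a tuple list) by a single descending linear scan over k on a stably time-sorted index list, returning the first feasible k; equal because feasibility is monotone in k when times are nonnegative.
-- outside the precondition, e.g. on solve(3, -6, [5, 4, 5], [-3, -3, -1]): A returns (0, []), B returns (3, [1, 2, 3])
import Mathlib
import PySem

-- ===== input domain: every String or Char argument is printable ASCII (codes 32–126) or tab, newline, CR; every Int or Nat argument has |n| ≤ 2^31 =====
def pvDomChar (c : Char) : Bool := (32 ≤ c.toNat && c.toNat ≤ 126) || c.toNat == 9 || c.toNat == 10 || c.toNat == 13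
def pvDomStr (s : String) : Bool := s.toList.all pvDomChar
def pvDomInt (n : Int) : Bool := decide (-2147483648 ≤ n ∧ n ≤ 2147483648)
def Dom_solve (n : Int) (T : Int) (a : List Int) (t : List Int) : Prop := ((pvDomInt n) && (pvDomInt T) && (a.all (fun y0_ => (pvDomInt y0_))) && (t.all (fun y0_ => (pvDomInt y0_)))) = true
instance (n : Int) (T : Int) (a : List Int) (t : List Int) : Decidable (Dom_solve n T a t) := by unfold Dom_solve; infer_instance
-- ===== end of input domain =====

-- B replaces A's binary search (and its check() helper on a tuple list) by a descending
-- linear scan over k on a stably time-sorted index list: simpler control flow, same value.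

-- ===== PORT A =====
-- check(k, b, T)
def checkA (k : Int) (b : List (Int × Int × Int)) (T : Int) :
    Bool × Option (List (Int × Int × Int)) :=
  let c := b.filter (fun e => decide (k ≤ e.1))
  if (c.length : Int) < k then (false, none)
  else
    let first_k_probs := PySem.List.slice c none (some k)
    let s := (first_k_probs.map (fun e => e.2.1)).sum
    if T < s then (false, none)
    else (true, some first_k_probs)

-- the 'while low <= high' loop of solve
def solveLoopA (b : List (Int × Int × Int)) (T : Int)
    (low high result : Int) (final_probs : List (Int × Int × Int)) :
    Int × List (Int × Int × Int) :=
  if _h : low ≤ high then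
    let mid := PySem.Int.floordiv (low + high) 2
    match checkA mid b T with
    | (true, probs) => solveLoopA b T (mid + 1) high mid (probs.getD [])
    | (false, _) => solveLoopA b T low (mid - 1) result final_probs
  else (result, final_probs)
termination_by (high + 1 - low).toNat
decreasing_by
  all_goals
    have h2 : low ≤ PySem.Int.floordiv (low + high) 2 ∧
        PySem.Int.floordiv (low + high) 2 ≤ high := by
      unfold PySem.Int.floordiv
      rw [Int.fdiv_eq_ediv]
      have : ((0:Int) ≤ 2 ∨ (2:Int) ∣ (low + high)) := Or.inl (by norm_num)
      simp only [this, if_pos]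
      omega
    omega

def solve (n : Int) (T : Int) (a : List Int) (t : List Int) : Int × List Int :=
  let b0 := (PySem.List.pyRange 0 n 1).map (fun i =>
    ((PySem.List.pyGet? a i).getD 0, (PySem.List.pyGet? t i).getD 0, i + 1))
  let b := PySem.List.sorted b0 (fun x => x.2.1) false
  let r := solveLoopA b T 0 n 0 []
  (r.1, r.2.map (fun e => e.2.2))

-- ===== PORT B =====
-- the 'for k in range(n, 0, -1)' loop of B's solve
def solveLoopB (T : Int) (a : List Int) (t : List Int) (order : List Int) (k : Int) : Int × List Int :=
  if h : 0 < k then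
    let chosen := PySem.List.slice
      (order.filter (fun i => decide (k ≤ (PySem.List.pyGet? a i).getD 0))) none (some k)
    if (chosen.length : Int) = k ∧ (chosen.map (fun i => (PySem.List.pyGet? t i).getD 0)).sum ≤ T then
      (k, chosen.map (fun i => i + 1))
    else solveLoopB T a t order (k - 1)
  else (0, [])
termination_by k.toNat
decreasing_by omega

def solve_alt (n : Int) (T : Int) (a : List Int) (t : List Int) : Int × List Int :=
  let order := PySem.List.sorted (PySem.List.pyRange 0 n 1)
    (fun i => (PySem.List.pyGet? t i).getD 0) false
  solveLoopB T a t order n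

-- ===== PRECONDITION & SPEC =====
-- Pre_ excludes (i) n exceeding the length of a or t, where A raises IndexError, and
-- (ii) negative times among t[0:n], outside the natural domain of solving times, where
-- A's binary search relies on a monotonicity that fails and returns a non-maximal k.
def Pre_solve (n : Int) (T : Int) (a : List Int) (t : List Int) : Prop :=
  n.toNat ≤ a.length ∧ n.toNat ≤ t.length ∧ ∀ x ∈ t.take n.toNat, 0 ≤ x
instance (n : Int) (T : Int) (a : List Int) (t : List Int) : Decidable (Pre_solve n T a t) := by
  unfold Pre_solve; infer_instance

def pvWitness_solve : Int × Int × List Int × List Int := (3, 4, [2, 1, 2], [2, 3, 1])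

def Spec_solve (n : Int) (T : Int) (a : List Int) (t : List Int) (out : Int × List Int) : Prop :=
  out = solve_alt n T a t
instance (n : Int) (T : Int) (a : List Int) (t : List Int) (out : Int × List Int) :
    Decidable (Spec_solve n T a t out) := by unfold Spec_solve; infer_instance

-- ===== CLAIM (what is proved, stated in full; the proofs are below) =====
def Claim_equal_solve : Prop := ∀ (n : Int) (T : Int) (a : List Int) (t : List Int),
  Dom_solve n T a t → Pre_solve n T a t → Spec_solve n T a t (solve n T a t)

-- ===== LEMMAS AND PROOFS =====

-- proof-side abbreviations: the filtered list, the selected prefix, the feasibility test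
def csetP (b : List (Int × Int × Int)) (k : Int) : List (Int × Int × Int) :=
  b.filter (fun e => decide (k ≤ e.1))

def selP (b : List (Int × Int × Int)) (k : Int) : List (Int × Int × Int) :=
  (csetP b k).take k.toNat

def PfeasB (b : List (Int × Int × Int)) (T k : Int) : Bool :=
  decide (k ≤ ((csetP b k).length : Int)) && decide (((selP b k).map (fun e => e.2.1)).sum ≤ T)

def Mof (b : List (Int × Int × Int)) (T n : Int) : Nat :=
  Nat.findGreatest (fun m => PfeasB b T (m : Int) = true) n.toNat

lemma check_eq (k : Int) (b : List (Int × Int × Int)) (T : Int) (hk : 0 ≤ k) :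
    checkA k b T = (if PfeasB b T k then (true, some (selP b k)) else (false, none)) := by
  unfold checkA PfeasB selP csetP
  simp only [PySem.List.slice_to _ hk]
  by_cases h1 : k ≤ ((b.filter (fun e => decide (k ≤ e.1))).length : Int)
  · by_cases h2 : (List.take k.toNat (List.map (fun e => e.2.1) (b.filter (fun e => decide (k ≤ e.1))))).sum ≤ T
    · simp [h1, h2, not_lt.mpr h1, not_lt.mpr h2, List.map_take]
    · simp [h1, h2, not_lt.mpr h1, lt_of_not_ge h2, List.map_take]
  · simp [h1, lt_of_not_ge h1]

lemma mid_bounds (low high : Int) (h : low ≤ high) :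
    low ≤ PySem.Int.floordiv (low + high) 2 ∧ PySem.Int.floordiv (low + high) 2 ≤ high := by
  unfold PySem.Int.floordiv
  rw [Int.fdiv_eq_ediv]
  have : ((0:Int) ≤ 2 ∨ (2:Int) ∣ (low + high)) := Or.inl (by norm_num)
  simp only [this, if_pos]
  omega

-- a sublist of a key-sorted list dominates it pointwise
lemma sub_key_le {u v : List (Int × Int × Int)} (hsub : u.Sublist v) :
    v.Pairwise (fun x y => x.2.1 ≤ y.2.1) →
    ∀ i (hi : i < u.length) (hv : i < v.length), v[i].2.1 ≤ u[i].2.1 := by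
  induction hsub with
  | slnil => intro _ i hi; simp at hi
  | @cons u' v' a hs ih =>
    intro hsort i hi hv
    have hsort' := (List.pairwise_cons.mp hsort).2
    have hlen := hs.length_le
    have hiv : i < v'.length := by omega
    have base := ih hsort' i hi hiv
    cases i with
    | zero =>
      have h0 : v'[0] ∈ v' := List.getElem_mem hiv
      have ha := (List.pairwise_cons.mp hsort).1 _ h0
      calc (a :: v')[0].2.1 = a.2.1 := rfl
        _ ≤ v'[0].2.1 := ha
        _ ≤ u'[0].2.1 := base
    | succ j =>
      have hj : j < v'.length := by omega
      have hstep : v'[j].2.1 ≤ v'[j+1].2.1 :=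
        List.pairwise_iff_getElem.mp hsort' j (j+1) hj hiv (by omega)
      calc (a :: v')[j+1].2.1 = v'[j].2.1 := by simp
        _ ≤ v'[j+1].2.1 := hstep
        _ ≤ u'[j+1].2.1 := base
  | @cons₂ u' v' a hs ih =>
    intro hsort i hi hv
    have hsort' := (List.pairwise_cons.mp hsort).2
    cases i with
    | zero => simp
    | succ j =>
      have := ih hsort' j (by simpa using hi) (by simpa using hv)
      simpa using this

-- pointwise-dominated prefixes have dominated sums
lemma sum_take_le : ∀ (m : Nat) (u v : List (Int × Int × Int)),
    m ≤ u.length → m ≤ v.length →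
    (∀ i (h1 : i < u.length) (h2 : i < v.length), v[i].2.1 ≤ u[i].2.1) →
    ((v.take m).map (fun e => e.2.1)).sum ≤ ((u.take m).map (fun e => e.2.1)).sum := by
  intro m
  induction m with
  | zero => intro u v _ _ _; simp
  | succ m ih =>
    intro u v hu hv h
    match u, v with
    | x :: u', y :: v' =>
      simp only [List.take_succ_cons, List.map_cons, List.sum_cons]
      have h0 : y.2.1 ≤ x.2.1 := by
        have := h 0 (by simp) (by simp); simpa using this
      have ht : ((v'.take m).map (fun e => e.2.1)).sum ≤ ((u'.take m).map (fun e => e.2.1)).sum := by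
        apply ih u' v' (by simpa using hu) (by simpa using hv)
        intro i h1 h2
        have := h (i+1) (by simpa using h1) (by simpa using h2)
        simpa using this
      omega

-- monotonicity of feasibility for nonnegative times on a time-sorted list
lemma Pfeas_mono (b : List (Int × Int × Int)) (T : Int)
    (hkey : ∀ e ∈ b, 0 ≤ e.2.1) (hsort : b.Pairwise (fun x y => x.2.1 ≤ y.2.1))
    {j k : Int} (hj : 0 ≤ j) (hjk : j ≤ k) (hP : PfeasB b T k = true) :
    PfeasB b T j = true := by
  unfold PfeasB at hP ⊢
  rw [Bool.and_eq_true, decide_eq_true_iff, decide_eq_true_iff] at hP ⊢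
  obtain ⟨hlen, hsum⟩ := hP
  have hsubJK : (csetP b k).Sublist (csetP b j) := by
    apply List.monotone_filter_right
    intro e he
    rw [decide_eq_true_iff] at he ⊢
    omega
  have hsubK : (csetP b k).Sublist b := List.filter_sublist
  have hsubJ : (csetP b j).Sublist b := List.filter_sublist
  have hlenJK : (csetP b k).length ≤ (csetP b j).length := hsubJK.length_le
  have hkK : k.toNat ≤ (csetP b k).length := by omega
  have hjJ : j.toNat ≤ (csetP b j).length := by omega
  constructor
  · omega
  · -- sum over first j of csetP j  ≤  sum over first j of csetP k  ≤  sum over first k of csetP k ≤ T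
    have hsortJ : (csetP b j).Pairwise (fun x y => x.2.1 ≤ y.2.1) := hsort.sublist hsubJ
    have step1 : (((csetP b j).take j.toNat).map (fun e => e.2.1)).sum ≤
        (((csetP b k).take j.toNat).map (fun e => e.2.1)).sum := by
      apply sum_take_le j.toNat (csetP b k) (csetP b j) (by omega) (by omega)
      intro i h1 h2
      exact sub_key_le hsubJK hsortJ i h1 h2
    have step2 : (((csetP b k).take j.toNat).map (fun e => e.2.1)).sum ≤
        (((csetP b k).take k.toNat).map (fun e => e.2.1)).sum := by
      have hsplit : k.toNat = j.toNat + (k.toNat - j.toNat) := by omega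
      rw [hsplit, List.take_add, List.map_append, List.sum_append]
      have : 0 ≤ ((((csetP b k).drop j.toNat).take (k.toNat - j.toNat)).map (fun e => e.2.1)).sum := by
        apply List.sum_nonneg
        intro x hx
        simp only [List.mem_map] at hx
        obtain ⟨e, he, rfl⟩ := hx
        exact hkey e (hsubK.subset (List.mem_of_mem_drop (List.mem_of_mem_take he)))
      omega
    unfold selP at hsum ⊢
    omega

lemma loopA_eq (T n : Int) (b : List (Int × Int × Int))
    (hkey : ∀ e ∈ b, 0 ≤ e.2.1) (hsort : b.Pairwise (fun x y => x.2.1 ≤ y.2.1)) :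
    ∀ (d : Nat) (low high result : Int) (probs : List (Int × Int × Int)),
    (high + 1 - low).toNat = d → 0 ≤ low → (low = 0 ∨ low ≤ n + 1) → high ≤ n →
    (∀ j, 0 ≤ j → j < low → PfeasB b T j = true) →
    (∀ j, high < j → j ≤ n → ¬ PfeasB b T j = true) →
    result = (if 1 ≤ low then low - 1 else 0) →
    probs = selP b result →
    solveLoopA b T low high result probs = (((Mof b T n : Nat) : Int), selP b ((Mof b T n : Nat) : Int)) := by
  intro d
  induction d using Nat.strong_induction_on with
  | _ d IH =>
    intro low high result probs hd h0 hup hhn hlow hhigh hres hprobs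
    rw [solveLoopA]
    by_cases hlh : low ≤ high
    · rw [dif_pos hlh]
      obtain ⟨hm1, hm2⟩ := mid_bounds low high hlh
      have hmid0 : 0 ≤ PySem.Int.floordiv (low + high) 2 := le_trans h0 hm1
      simp only [check_eq _ b T hmid0]
      set mid := PySem.Int.floordiv (low + high) 2 with hmid
      by_cases hP : PfeasB b T mid = true
      · rw [if_pos hP]
        show solveLoopA b T (mid + 1) high mid (selP b mid) = _
        apply IH (high + 1 - (mid + 1)).toNat (by omega) (mid + 1) high mid (selP b mid) rfl
          (by omega) (Or.inr (by omega)) hhn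
        · intro j hj0 hj
          exact Pfeas_mono b T hkey hsort hj0 (by omega) hP
        · exact hhigh
        · simp [show (1:Int) ≤ mid + 1 by omega]
        · rfl
      · rw [if_neg hP]
        show solveLoopA b T low (mid - 1) result probs = _
        apply IH (mid - 1 + 1 - low).toNat (by omega) low (mid - 1) result probs rfl h0
          hup (by omega) hlow
        · intro j hj hjn
          by_cases hjh : j ≤ high
          · intro hPj
            exact hP (Pfeas_mono b T hkey hsort hmid0 (by omega) hPj)
          · exact hhigh j (by omega) hjn
        · exact hres
        · exact hprobs
    · rw [dif_neg hlh]
      have h0r : 0 ≤ result := by rw [hres]; split_ifs <;> omega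
      have hM : Mof b T n = result.toNat := by
        unfold Mof
        rw [Nat.findGreatest_eq_iff]
        refine ⟨?_, ?_, ?_⟩
        · rw [hres]; rcases hup with h | h <;> split_ifs <;> omega
        · intro hne
          have h1l : 1 ≤ low := by
            by_contra hc
            rw [hres, if_neg hc] at hne; simp at hne
          have hres' : result = low - 1 := by rw [hres, if_pos h1l]
          rw [show ((result.toNat : Nat) : Int) = low - 1 by omega]
          exact hlow (low - 1) (by omega) (by omega)
        · intro m hm1 hm2
          apply hhigh
          · rw [hres] at hm1; split_ifs at hm1 <;> omega
          · omega
      have hMi : ((Mof b T n : Nat) : Int) = result := by omega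
      rw [hMi, hprobs]

lemma loopB_eq (T n : Int) (a t : List Int) (order : List Int) :
    ∀ (k : Int), k ≤ n →
    (∀ j, k < j → j ≤ n → ¬ PfeasB (order.map (fun i => ((PySem.List.pyGet? a i).getD 0, (PySem.List.pyGet? t i).getD 0, i + 1))) T j = true) →
    solveLoopB T a t order k =
      (((Mof (order.map (fun i => ((PySem.List.pyGet? a i).getD 0, (PySem.List.pyGet? t i).getD 0, i + 1))) T n : Nat) : Int),
       (selP (order.map (fun i => ((PySem.List.pyGet? a i).getD 0, (PySem.List.pyGet? t i).getD 0, i + 1))) ((Mof (order.map (fun i => ((PySem.List.pyGet? a i).getD 0, (PySem.List.pyGet? t i).getD 0, i + 1))) T n : Nat) : Int)).map (fun i => i.2.2)) := by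
  set b := order.map (fun i => ((PySem.List.pyGet? a i).getD 0, (PySem.List.pyGet? t i).getD 0, i + 1)) with hb
  suffices main : ∀ (d : Nat) (k : Int), k.toNat = d → k ≤ n →
      (∀ j, k < j → j ≤ n → ¬ PfeasB b T j = true) →
      solveLoopB T a t order k = (((Mof b T n : Nat) : Int), (selP b ((Mof b T n : Nat) : Int)).map (fun i => i.2.2)) by
    intro k hkn hup
    exact main k.toNat k rfl hkn hup
  intro d
  induction d using Nat.strong_induction_on with
  | _ d IH =>
    intro k hd hkn hup
    rw [solveLoopB]
    by_cases hk0 : 0 < k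
    · rw [dif_pos hk0]
      simp only [PySem.List.slice_to _ (le_of_lt hk0)]
      set q := (fun i : Int => decide (k ≤ (PySem.List.pyGet? a i).getD 0)) with hq
      set chosen := (order.filter q).take k.toNat with hchosen
      have hcset : csetP b k =
          (order.filter q).map (fun i => ((PySem.List.pyGet? a i).getD 0, (PySem.List.pyGet? t i).getD 0, i + 1)) := by
        rw [hb]; unfold csetP; rw [List.filter_map]; rfl
      have hsel : selP b k = chosen.map (fun i => ((PySem.List.pyGet? a i).getD 0, (PySem.List.pyGet? t i).getD 0, i + 1)) := by
        unfold selP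
        rw [hcset, hchosen, List.map_take]
      have hlenc : (csetP b k).length = (order.filter q).length := by rw [hcset, List.length_map]
      have hlen : chosen.length = min k.toNat (order.filter q).length := by
        rw [hchosen, List.length_take]
      have hsum : (selP b k).map (fun e => e.2.1) = chosen.map (fun i => (PySem.List.pyGet? t i).getD 0) := by
        rw [hsel, List.map_map]; rfl
      have hcond : (((chosen.length : Nat) : Int) = k ∧
          (chosen.map (fun i => (PySem.List.pyGet? t i).getD 0)).sum ≤ T) ↔ PfeasB b T k = true := by
        unfold PfeasB
        rw [Bool.and_eq_true, decide_eq_true_iff, decide_eq_true_iff]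
        constructor
        · rintro ⟨h1, h2⟩
          refine ⟨by omega, ?_⟩
          rw [hsum]; exact h2
        · rintro ⟨h1, h2⟩
          refine ⟨by omega, ?_⟩
          rw [← hsum]; exact h2
      by_cases hP : PfeasB b T k = true
      · rw [if_pos (hcond.mpr hP)]
        have hMk : Mof b T n = k.toNat := by
          unfold Mof
          rw [Nat.findGreatest_eq_iff]
          refine ⟨by omega, fun _ => ?_, fun m hm1 hm2 => hup (m : Int) (by omega) (by omega)⟩
          rw [show ((k.toNat : Nat) : Int) = k by omega]
          exact hP
        rw [hMk, show ((k.toNat : Nat) : Int) = k by omega, hsel, List.map_map]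
        rfl
      · rw [if_neg (fun hc => hP (hcond.mp hc))]
        refine IH (k - 1).toNat (by omega) (k - 1) rfl (by omega) ?_
        intro j hj hjn
        by_cases hjk : k < j
        · exact hup j hjk hjn
        · have hjeq : j = k := by omega
          rw [hjeq]; exact hP
    · rw [dif_neg hk0]
      have hM0 : Mof b T n = 0 := by
        unfold Mof
        rw [Nat.findGreatest_eq_iff]
        exact ⟨Nat.zero_le _, by simp, fun m hm1 hm2 => hup (m : Int) (by omega) (by omega)⟩
      rw [hM0]
      simp [selP, csetP]

-- sorting a mapped list = mapping the sort under the composed key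
lemma insertBy_map {α β : Type} (f : α → β) (key : β → Int) (x : α) (ys : List α) :
    PySem.List.insertBy (fun a b => decide (key a < key b)) (f x) (ys.map f) =
      (PySem.List.insertBy (fun a b => decide (key (f a) < key (f b))) x ys).map f := by
  induction ys with
  | nil => rfl
  | cons y ys ih =>
    simp only [List.map_cons, PySem.List.insertBy]
    by_cases h : key (f x) < key (f y) <;> simp [h, ih]

lemma sorted_map {α β : Type} (xs : List α) (f : α → β) (key : β → Int) :
    PySem.List.sorted (xs.map f) key false =
      (PySem.List.sorted xs (fun x => key (f x)) false).map f := by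
  rw [PySem.List.sorted_eq_foldl_insertBy, PySem.List.sorted_eq_foldl_insertBy]
  suffices h : ∀ (acc : List β) (accI : List α), acc = accI.map f →
      (xs.map f).foldl (fun acc x => PySem.List.insertBy (fun a b => decide (key a < key b)) x acc) acc =
        (xs.foldl (fun acc x => PySem.List.insertBy (fun a b => decide (key (f a) < key (f b))) x acc) accI).map f by
    exact h [] [] rfl
  induction xs with
  | nil => intro acc accI h; simpa using h
  | cons x xs ih =>
    intro acc accI h
    simp only [List.map_cons, List.foldl_cons]
    exact ih _ _ (by rw [h, insertBy_map])

theorem solve_spec : Claim_equal_solve := by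
  intro n T a t hDom hPre
  obtain ⟨hna, hnt, ht0⟩ := hPre
  unfold Spec_solve
  have horder : PySem.List.sorted ((PySem.List.pyRange 0 n 1).map (fun i => ((PySem.List.pyGet? a i).getD 0, (PySem.List.pyGet? t i).getD 0, i + 1))) (fun x => x.2.1) false
      = (PySem.List.sorted (PySem.List.pyRange 0 n 1) (fun i => ((fun i => ((PySem.List.pyGet? a i).getD 0, (PySem.List.pyGet? t i).getD 0, i + 1)) i).2.1) false).map (fun i => ((PySem.List.pyGet? a i).getD 0, (PySem.List.pyGet? t i).getD 0, i + 1)) :=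
    sorted_map (PySem.List.pyRange 0 n 1) (fun i => ((PySem.List.pyGet? a i).getD 0, (PySem.List.pyGet? t i).getD 0, i + 1)) (fun x => x.2.1)
  have hkeyfun : (fun i => ((fun i => ((PySem.List.pyGet? a i).getD 0, (PySem.List.pyGet? t i).getD 0, i + 1)) i).2.1) = (fun i : Int => (PySem.List.pyGet? t i).getD 0) := rfl
  rw [hkeyfun] at horder
  set O := PySem.List.sorted (PySem.List.pyRange 0 n 1) (fun i : Int => (PySem.List.pyGet? t i).getD 0) false with hO
  set B := O.map (fun i => ((PySem.List.pyGet? a i).getD 0, (PySem.List.pyGet? t i).getD 0, i + 1)) with hB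
  have hkey : ∀ e ∈ B, 0 ≤ e.2.1 := by
    intro e he
    rw [hB] at he
    simp only [List.mem_map] at he
    obtain ⟨i, hi, rfl⟩ := he
    have hiO : i ∈ O := hi
    rw [hO, PySem.List.mem_sorted, PySem.List.mem_pyRange_one] at hiO
    obtain ⟨hi0, hin⟩ := hiO
    have hlt : i.toNat < t.length := by omega
    have hget : PySem.List.pyGet? t i = t[i.toNat]? := PySem.List.pyGet?_of_nonneg t hi0
    rw [List.getElem?_eq_getElem hlt] at hget
    simp only [hget, Option.getD_some]
    have hm : t[i.toNat] ∈ t.take n.toNat := by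
      have hlen : i.toNat < (t.take n.toNat).length := by simp; omega
      have := List.getElem_mem hlen
      rwa [List.getElem_take] at this
    exact ht0 _ hm
  have hsort : B.Pairwise (fun x y => x.2.1 ≤ y.2.1) := by
    rw [← horder]
    exact PySem.List.sorted_pairwise _ _
  have hA := loopA_eq T n B hkey hsort (n + 1 - 0).toNat 0 n 0 [] rfl le_rfl (Or.inl rfl) le_rfl
      (fun j hj hlt => absurd hj (by omega)) (by intro j h1 h2 _; omega) (by norm_num)
      (by simp [selP, csetP])
  have hB2 := loopB_eq T n a t O n le_rfl (by intro j h1 h2 _; omega)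
  show ((solveLoopA (PySem.List.sorted ((PySem.List.pyRange 0 n 1).map (fun i => ((PySem.List.pyGet? a i).getD 0, (PySem.List.pyGet? t i).getD 0, i + 1))) (fun x => x.2.1) false) T 0 n 0 []).1,
        (solveLoopA (PySem.List.sorted ((PySem.List.pyRange 0 n 1).map (fun i => ((PySem.List.pyGet? a i).getD 0, (PySem.List.pyGet? t i).getD 0, i + 1))) (fun x => x.2.1) false) T 0 n 0 []).2.map (fun e => e.2.2))
      = solveLoopB T a t O n
  rw [horder, hA, hB2]
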